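-- pv_equiv track=rewrite | github.com/calvinyhchen/CS275-project-L_System | demo/para_new.py | intrp_expr
-- ===== SOURCE A (Python) =====
-- def intrp_expr(expr):
-- # A(s, w):s>=0 -> !(w)F(s)[()+(35)/(0)A(s*0.75, w*0.5^0.4)]()[()+(-35)/(0)A(s*0.77, w*0.5^0.4)]()
-- # !, w, F, s, [, , +, 35, / 0, A, (s*0.75, w*(0.5)^(0.4)), ], , [, , +, -35, /, 0, A, (s*0.77, w*(0.5)^(0.4)), ],
--
--     action_list = []
--     expr_list = expr.split(')')
--     for ep in expr_list:
--         if ep != '':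
--             f = ep[0]
--             p = ep[ep.find('(')+1:]
--             action_list.append((f, p))
--     return action_list
-- ===== SOURCE B (Python) =====
-- def intrp_expr(expr):
--     # single left-to-right scan: collect chars into buf, emit an action at each
--     # closing parenthesis (and once more at end of input, via an appended sentinel)
--     action_list = []
--     buf = ''
--     for ch in expr + ')':
--         if ch == ')':
--             if buf:
--                 action_list.append((buf[0], buf[buf.find('(') + 1:]))
--             buf = ''
--         else:
--             buf += ch
--     return action_list
-- ===== Notes on version B (the rewrite author's own statement) =====
-- stated objective: alternative
-- what changed: Replaced the split-on-closing-parenthesis-then-reindex two-pass structure by one fused left-to-right character scan maintaining a current-segment buffer that is flushed at each closing parenthesis and once at end of input.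
import Mathlib
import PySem

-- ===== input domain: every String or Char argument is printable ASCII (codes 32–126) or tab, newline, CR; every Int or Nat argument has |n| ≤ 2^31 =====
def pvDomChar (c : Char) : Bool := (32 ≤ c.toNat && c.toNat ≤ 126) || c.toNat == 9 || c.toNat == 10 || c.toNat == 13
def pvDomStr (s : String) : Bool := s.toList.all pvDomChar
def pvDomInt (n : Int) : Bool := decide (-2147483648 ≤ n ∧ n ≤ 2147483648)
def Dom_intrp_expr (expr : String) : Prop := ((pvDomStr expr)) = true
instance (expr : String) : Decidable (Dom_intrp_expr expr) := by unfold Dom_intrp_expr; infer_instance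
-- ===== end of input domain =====

-- B replaces A's split-then-reindex two-pass structure by one fused buffer scan (alternative decomposition, same cost).

-- ===== PORT A =====
-- A: split on the closing parenthesis, then for each nonempty segment ep take f = ep[0] and p = the part of ep after its first opening parenthesis (the whole of ep if it has none).
-- ep[0] is ported as String.ofList (ep.take 1): exact here since the branch guarantees ep ≠ [].
def intrp_expr (expr : String) : List (String × String) :=
  (PySem.Chars.splitOn expr.toList [')']).foldl
    (fun action_list ep =>
      if ep ≠ [] then
        let f := String.ofList (ep.take 1)
        let p := String.ofList (PySem.List.slice ep (some (PySem.Chars.find ep ['('] + 1)) none)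
        action_list ++ [(f, p)]
      else action_list) []

-- ===== PORT B =====
-- flush the current buffer: emit one action if it is nonempty
def pvFlush (buf : List Char) (acc : List (String × String)) : List (String × String) :=
  if buf ≠ [] then
    acc ++ [(String.ofList (buf.take 1),
             String.ofList (PySem.List.slice buf (some (PySem.Chars.find buf ['('] + 1)) none))]
  else acc

-- the for-loop of B over the remaining characters, with state (buf, acc)
def pvScan (cs : List Char) (buf : List Char) (acc : List (String × String)) :
    List (String × String) :=
  match cs with
  | [] => acc
  | c :: rest =>
      if c = ')' then pvScan rest [] (pvFlush buf acc)
      else pvScan rest (buf ++ [c]) acc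

def intrp_expr_alt (expr : String) : List (String × String) :=
  pvScan (expr.toList ++ [')']) [] []

-- ===== PRECONDITION & SPEC =====
def Spec_intrp_expr (expr : String) (out : List (String × String)) : Prop := out = intrp_expr_alt expr
instance (expr : String) (out : List (String × String)) : Decidable (Spec_intrp_expr expr out) := by unfold Spec_intrp_expr; infer_instance

-- ===== CLAIM (what is proved, stated in full; the proofs are below) =====
def Claim_equal_intrp_expr : Prop := ∀ (expr : String), Dom_intrp_expr expr → Spec_intrp_expr expr (intrp_expr expr)

-- ===== LEMMAS AND PROOFS =====

-- reference split: pure structural recursion on the character list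
def pvSplit : List Char → List (List Char)
  | [] => [[]]
  | c :: rest => if c = ')' then [] :: pvSplit rest else (pvSplit rest).modifyHead (c :: ·)

lemma pvSplit_ne_nil (cs : List Char) : pvSplit cs ≠ [] := by
  cases cs with
  | nil => simp [pvSplit]
  | cons c rest =>
      simp only [pvSplit]
      split
      · simp
      · cases h : pvSplit rest with
        | nil => exact absurd h (pvSplit_ne_nil rest)
        | cons a t => simp [List.modifyHead]

lemma mh_fun_id (l : List (List Char)) :
    l.modifyHead (fun x => x) = l := by
  cases l <;> simp [List.modifyHead]

lemma mh_nil (l : List (List Char)) :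
    l.modifyHead (fun x => ([] : List Char) ++ x) = l := by
  cases l <;> simp [List.modifyHead]

lemma mh_snoc (l : List (List Char)) (buf : List Char) (c : Char) :
    l.modifyHead (fun x => (buf ++ [c]) ++ x) =
      (l.modifyHead (fun x => c :: x)).modifyHead (fun x => buf ++ x) := by
  cases l <;> simp [List.modifyHead]

lemma splitOn_go_eq (fuel : Nat) (l cur : List Char) (acc : List (List Char))
    (h : l.length < fuel) :
    PySem.Chars.splitOn.go [')'] fuel l cur acc =
      acc.reverse ++ (pvSplit l).modifyHead (cur.reverse ++ ·) := by
  induction l generalizing fuel cur acc with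
  | nil =>
      cases fuel with
      | zero => omega
      | succ f => simp [PySem.Chars.splitOn.go, pvSplit, List.modifyHead]
  | cons c rest ih =>
      cases fuel with
      | zero => omega
      | succ f =>
        rw [PySem.Chars.splitOn.go]
        by_cases hc : c = ')'
        · subst hc
          simp only [List.isPrefixOf, beq_self_eq_true, Bool.true_and, if_pos, List.length_cons, List.length_nil, List.drop_succ_cons,
            List.drop_zero]
          rw [ih f [] (List.reverse cur :: acc) (by simpa using Nat.lt_of_succ_lt_succ h)]
          cases hs : pvSplit rest with
          | nil => exact absurd hs (pvSplit_ne_nil rest)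
          | cons a t => simp [pvSplit, List.modifyHead, hs]
        · have hb : ([')'].isPrefixOf (c :: rest)) = false := by
            simp [List.isPrefixOf]; exact fun hh => absurd hh.symm hc
          simp only [hb, Bool.false_eq_true, if_false]
          rw [ih f (c :: cur) acc (by simpa using Nat.lt_of_succ_lt_succ h)]
          simp only [pvSplit, if_neg hc]
          congr 1
          cases hs : pvSplit rest with
          | nil => exact absurd hs (pvSplit_ne_nil rest)
          | cons a t => simp [List.modifyHead]

-- A's per-segment step, named for the proofs
def pvStep (acc : List (String × String)) (ep : List Char) : List (String × String) :=
  if ep ≠ [] then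
    acc ++ [(String.ofList (ep.take 1),
             String.ofList (PySem.List.slice ep (some (PySem.Chars.find ep ['('] + 1)) none))]
  else acc

lemma pvFlush_eq_step (buf : List Char) (acc : List (String × String)) :
    pvFlush buf acc = pvStep acc buf := rfl

lemma pvScan_eq_fold (cs buf : List Char) (acc : List (String × String)) :
    pvScan (cs ++ [')']) buf acc =
      ((pvSplit cs).modifyHead (buf ++ ·)).foldl pvStep acc := by
  induction cs generalizing buf acc with
  | nil =>
      simp [pvScan, pvSplit, List.modifyHead, pvFlush_eq_step]
  | cons c rest ih =>
      by_cases hc : c = ')'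
      · subst hc
        simp only [List.cons_append, pvScan, if_pos, pvFlush_eq_step]
        rw [ih [] (pvStep acc buf)]
        cases hs : pvSplit rest with
        | nil => exact absurd hs (pvSplit_ne_nil rest)
        | cons a t => simp [pvSplit, List.modifyHead, hs]
      · simp only [List.cons_append, pvScan, if_neg hc]
        rw [ih (buf ++ [c]) acc, mh_snoc]
        simp only [pvSplit, if_neg hc]

lemma intrp_expr_eq_fold (expr : String) :
    intrp_expr expr = (pvSplit expr.toList).foldl pvStep [] := by
  unfold intrp_expr PySem.Chars.splitOn
  rw [splitOn_go_eq (expr.toList.length + 1) expr.toList [] [] (by omega)]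
  simp only [List.reverse_nil, List.nil_append, mh_fun_id]
  rfl

lemma intrp_expr_alt_eq_fold (expr : String) :
    intrp_expr_alt expr = (pvSplit expr.toList).foldl pvStep [] := by
  unfold intrp_expr_alt
  rw [pvScan_eq_fold expr.toList [] [], mh_nil]

-- ===== VERDICT (by name: the statement is the Claim_ definition above) =====
theorem intrp_expr_spec : Claim_equal_intrp_expr := by
  intro expr _
  unfold Spec_intrp_expr
  rw [intrp_expr_eq_fold, intrp_expr_alt_eq_fold]
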